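-- pv_equiv track=rewrite | github.com/magenta/magenta | magenta/music/chord_symbols_lib.py | _transpose_pitch_class
-- ===== SOURCE A (Python) =====
-- _STEPS_ABOVE = {'A': 2, 'B': 1, 'C': 2, 'D': 2, 'E': 1, 'F': 2, 'G': 2}
--
-- def _transpose_pitch_class(step, alter, transpose_amount):
--   """Transposes a chord symbol figure string by the given amount."""
--   transpose_amount %= 12
--
--   # Transpose up as many steps as we can.
--   while transpose_amount >= _STEPS_ABOVE[step]:
--     transpose_amount -= _STEPS_ABOVE[step]
--     step = chr(ord('A') + (ord(step) - ord('A') + 1) % 7)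
--
--   if transpose_amount > 0:
--     if alter >= 0:
--       # Transpose up one more step and remove sharps (or add flats).
--       alter -= _STEPS_ABOVE[step] - transpose_amount
--       step = chr(ord('A') + (ord(step) - ord('A') + 1) % 7)
--     else:
--       # Remove flats.
--       alter += transpose_amount
--
--   return step, alter
-- ===== SOURCE B (Python) =====
-- _SEMITONE = {'C': 0, 'D': 2, 'E': 4, 'F': 5, 'G': 7, 'A': 9, 'B': 11}
-- _STEPS_ABOVE = {'A': 2, 'B': 1, 'C': 2, 'D': 2, 'E': 1, 'F': 2, 'G': 2}
--
-- def _transpose_pitch_class(step, alter, transpose_amount):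
--   """Transposes a chord symbol figure string by the given amount."""
--   t = transpose_amount % 12
--   base = _SEMITONE[step]
--   # Landing letter: the one whose diatonic offset from `step` is the largest
--   # value not exceeding t (no step-by-step walk).
--   landing, best = step, 0
--   for letter, semi in _SEMITONE.items():
--     off = (semi - base) % 12
--     if best < off <= t:
--       landing, best = letter, off
--   r = t - best
--   if r > 0:
--     if alter >= 0:
--       alter -= _STEPS_ABOVE[landing] - r
--       landing = chr(ord('A') + (ord(landing) - ord('A') + 1) % 7)
--     else:
--       alter += r
--   return landing, alter
-- ===== Notes on version B (the rewrite author's own statement) =====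
-- stated objective: alternative
-- what changed: Replaces A's iterative semitone-by-semitone diatonic walk with a direct selection: from a precomputed semitone table, pick the letter whose diatonic offset from the start is the largest value not exceeding transpose_amount mod 12, then apply the same spelling rule once.
import Mathlib
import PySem

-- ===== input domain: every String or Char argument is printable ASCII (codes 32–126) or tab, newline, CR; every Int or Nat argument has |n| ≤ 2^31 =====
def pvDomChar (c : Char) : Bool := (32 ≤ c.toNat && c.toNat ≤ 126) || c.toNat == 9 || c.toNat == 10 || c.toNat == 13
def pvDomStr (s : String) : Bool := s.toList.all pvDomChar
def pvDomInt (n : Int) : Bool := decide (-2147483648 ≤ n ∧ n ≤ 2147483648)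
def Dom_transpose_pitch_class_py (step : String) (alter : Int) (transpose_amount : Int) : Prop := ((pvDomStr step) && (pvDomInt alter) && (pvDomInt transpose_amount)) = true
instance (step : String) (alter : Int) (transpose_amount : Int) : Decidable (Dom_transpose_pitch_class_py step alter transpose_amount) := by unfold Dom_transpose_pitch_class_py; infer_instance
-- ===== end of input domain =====

-- B replaces A's semitone-by-semitone diatonic walk by a direct argmax over a precomputed
-- table of diatonic offsets (alternative decomposition; same exact spelling rule).

-- ===== PORT A =====
def stepsAbove : PySem.Dict String Int :=
  PySem.Dict.ofList [("A", 2), ("B", 1), ("C", 2), ("D", 2), ("E", 1), ("F", 2), ("G", 2)]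

-- chr(ord('A') + (ord(step) - ord('A') + 1) % 7); exact for the one-letter A–G steps Pre_ admits
def nextLetter (step : String) : String :=
  String.ofList [Char.ofNat (65 + (((step.toList.headD 'A').toNat - 65 + 1) % 7))]

-- the while loop; inside Pre_ t < 12 and each iteration subtracts ≥ 1, so 12 iterations suffice
-- (the getD default 99 is unreachable inside Pre_, it only makes the function total)
def loopA : Nat → String → Int → String × Int
  | 0, step, t => (step, t)
  | f + 1, step, t =>
    let s := stepsAbove.getD step 99
    if s ≤ t then loopA f (nextLetter step) (t - s) else (step, t)

def transpose_pitch_class_py (step : String) (alter : Int) (transpose_amount : Int) : String × Int :=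
  let t := PySem.Int.mod transpose_amount 12
  let st := loopA 12 step t
  if 0 < st.2 then
    if 0 ≤ alter then (nextLetter st.1, alter - (stepsAbove.getD st.1 99 - st.2))
    else (st.1, alter + st.2)
  else (st.1, alter)

-- ===== PORT B =====
def semitone : PySem.Dict String Int :=
  PySem.Dict.ofList [("C", 0), ("D", 2), ("E", 4), ("F", 5), ("G", 7), ("A", 9), ("B", 11)]

def transpose_pitch_class_py_alt (step : String) (alter : Int) (transpose_amount : Int) : String × Int :=
  let t := PySem.Int.mod transpose_amount 12
  let base := semitone.getD step 0
  let lb := semitone.items.foldl (fun (p : String × Int) li =>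
      let off := PySem.Int.mod (li.2 - base) 12
      if p.2 < off ∧ off ≤ t then (li.1, off) else p) (step, 0)
  let r := t - lb.2
  if 0 < r then
    if 0 ≤ alter then (nextLetter lb.1, alter - (stepsAbove.getD lb.1 99 - r))
    else (lb.1, alter + r)
  else (lb.1, alter)

-- ===== PRECONDITION & SPEC =====
-- Pre_ admits exactly the seven natural-letter steps; any other step makes Python A raise KeyError.
def Pre_transpose_pitch_class_py (step : String) (alter : Int) (transpose_amount : Int) : Prop :=
  step ∈ (["A", "B", "C", "D", "E", "F", "G"] : List String)
instance (step : String) (alter : Int) (transpose_amount : Int) : Decidable (Pre_transpose_pitch_class_py step alter transpose_amount) := by unfold Pre_transpose_pitch_class_py; infer_instance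

def pvWitness_transpose_pitch_class_py : String × Int × Int := ("C", -1, 7)

def Spec_transpose_pitch_class_py (step : String) (alter : Int) (transpose_amount : Int) (out : String × Int) : Prop := out = transpose_pitch_class_py_alt step alter transpose_amount
instance (step : String) (alter : Int) (transpose_amount : Int) (out : String × Int) : Decidable (Spec_transpose_pitch_class_py step alter transpose_amount out) := by unfold Spec_transpose_pitch_class_py; infer_instance

-- ===== CLAIM (what is proved, stated in full; the proofs are below) =====
def Claim_equal_transpose_pitch_class_py : Prop := ∀ (step : String) (alter : Int) (transpose_amount : Int), Dom_transpose_pitch_class_py step alter transpose_amount → Pre_transpose_pitch_class_py step alter transpose_amount → Spec_transpose_pitch_class_py step alter transpose_amount (transpose_pitch_class_py step alter transpose_amount)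

-- ===== LEMMAS AND PROOFS =====
-- B's argmax fold, named for the proof (definitionally the fold inlined in the B port)
def pickB (step : String) (m : Int) : String × Int :=
  semitone.items.foldl (fun (p : String × Int) li =>
      let off := PySem.Int.mod (li.2 - semitone.getD step 0) 12
      if p.2 < off ∧ off ≤ m then (li.1, off) else p) (step, 0)

-- A's walk lands on B's argmax letter, with remainder m minus the chosen offset
theorem core_lemma (step : String) (hs : step ∈ (["A", "B", "C", "D", "E", "F", "G"] : List String))
    (m : Int) (h0 : 0 ≤ m) (h12 : m < 12) :
    loopA 12 step m = ((pickB step m).1, m - (pickB step m).2) := by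
  fin_cases hs <;> interval_cases m <;> decide

-- ===== VERDICT (by name: the statement is the Claim_ definition above) =====
theorem transpose_pitch_class_py_spec : Claim_equal_transpose_pitch_class_py := by
  intro step alter ta _ hpre
  unfold Spec_transpose_pitch_class_py
  simp only [transpose_pitch_class_py, transpose_pitch_class_py_alt]
  have hpos : (0:Int) < 12 := by norm_num
  have hm : PySem.Int.mod ta 12 = ta % 12 := PySem.Int.mod_eq_emod_of_pos hpos
  have h0 : 0 ≤ PySem.Int.mod ta 12 := by rw [hm]; exact Int.emod_nonneg ta (by norm_num)
  have h12 : PySem.Int.mod ta 12 < 12 := by rw [hm]; exact Int.emod_lt_of_pos ta hpos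
  have hcore := core_lemma step hpre (PySem.Int.mod ta 12) h0 h12
  simp only [pickB] at hcore
  rw [hcore]
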